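-- pv_equiv track=rewrite | github.com/keithwissing/adventofcode | 2025/day07.py | part2
-- ===== SOURCE A (Python) =====
-- from collections import defaultdict
-- from functools import cache
--
-- def part2(lines):
--     """
--     >>> part2(t1)
--     40
--     """
--     grid = defaultdict(lambda: '.', {(x, y): c for y, line in enumerate(lines) for x, c in enumerate(line)})
--     height = len(lines)
--
--     @cache
--     def routes(p):
--         while p[1] < height:
--             if grid[p] == '^':
--                 return routes((p[0] - 1, p[1])) + routes((p[0] + 1, p[1]))
--             p = (p[0], p[1] + 1)
--         return 1
--
--     start = next((p for p, v in grid.items() if v == 'S'))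
--     return routes(start)
-- ===== SOURCE B (Python) =====
-- def _find_start(lines):
--     for y, line in enumerate(lines):
--         for x, c in enumerate(line):
--             if c == 'S':
--                 return (x, y)
--     return None
--
--
-- def part2(lines):
--     height = len(lines)
--     width = max((len(l) for l in lines), default=0)
--     start = _find_start(lines)
--     if start is None:
--         raise ValueError("no start cell")
--     sx, sy = start
--
--     def get(row, x):
--         return row[x] if 0 <= x < width else 1
--
--     # bottom-up DP: below[x] = number of routes from cell (x, y+1) downwards
--     below = [1] * width
--     y = height - 1
--     while y >= sy:
--         line = lines[y]
--         below = [
--             (get(below, x - 1) + get(below, x + 1))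
--             if x < len(line) and line[x] == '^'
--             else below[x]
--             for x in range(width)
--         ]
--         y -= 1
--     return get(below, sx)
-- ===== Notes on version B (the rewrite author's own statement) =====
-- stated objective: alternative
-- what changed: Replaced the memoized top-down recursion over grid cells with an explicit bottom-up dynamic program that sweeps rows from the bottom, maintaining one array `below` of route counts per column; Pre_ excludes exactly the inputs on which A raises: grids with no 'S' (StopIteration) and grids where a '^' with a horizontally adjacent '^' is reachable from 'S' (routes recurses on itself: RecursionError); grids with only unreachable adjacent '^' stay inside Pre_ and B matches A there.
import Mathlib
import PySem

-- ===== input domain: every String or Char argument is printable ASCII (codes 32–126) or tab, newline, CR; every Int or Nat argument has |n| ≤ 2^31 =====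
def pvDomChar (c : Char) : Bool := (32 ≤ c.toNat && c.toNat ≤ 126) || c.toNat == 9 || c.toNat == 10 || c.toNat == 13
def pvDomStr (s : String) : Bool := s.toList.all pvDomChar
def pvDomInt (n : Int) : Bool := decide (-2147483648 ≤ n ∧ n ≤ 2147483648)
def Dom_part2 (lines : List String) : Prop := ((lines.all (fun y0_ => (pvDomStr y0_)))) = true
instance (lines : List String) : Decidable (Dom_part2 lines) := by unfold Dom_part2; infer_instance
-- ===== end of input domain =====

-- B replaces A's memoized top-down recursion by a bottom-up row-by-row dynamic program (objective: alternative, same cost).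

-- ===== PORT A =====
-- grid = defaultdict(lambda: '.', {(x, y): c for y, line in enumerate(lines) for x, c in enumerate(line)})
def pvBuildGrid (lines : List String) : PySem.Dict (Int × Int) Char :=
  (PySem.List.enumerate lines 0).foldl
    (fun d p => (PySem.List.enumerate p.2.toList 0).foldl (fun d q => d.insert (q.1, p.1) q.2) d)
    PySem.Dict.empty

-- routes(p): the while-loop walks down, '^' splits into the two same-row neighbours.
-- fuel is only a totality guard: each '^' split consumes one unit, and under Pre_part2
-- (no reachable adjacent '^') nested splits sit on strictly increasing rows, so height+1 units never run out.
def pvWalkA (grid : PySem.Dict (Int × Int) Char) (height : Int) (fuel : Nat) (x y : Int) : Int :=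
  if _h : y < height then
    if grid.getD (x, y) '.' = '^' then
      match fuel with
      | 0 => 0
      | f + 1 => pvWalkA grid height f (x - 1) y + pvWalkA grid height f (x + 1) y
    else
      pvWalkA grid height fuel x (y + 1)
  else 1
termination_by (fuel, (height - y).toNat)
decreasing_by
  · exact Prod.Lex.left _ _ (Nat.lt_succ_self f)
  · exact Prod.Lex.left _ _ (Nat.lt_succ_self f)
  · exact Prod.Lex.right fuel (by omega)

def part2 (lines : List String) : Int :=
  let grid := pvBuildGrid lines
  let height : Int := lines.length
  -- start = next((p for p, v in grid.items() if v == 'S'))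
  match grid.items.find? (fun pv => pv.2 == 'S') with
  | some pv => pvWalkA grid height (lines.length + 1) pv.1.1 pv.1.2
  | none => 0   -- Python raises StopIteration here; excluded by Pre_part2

-- ===== PORT B =====
-- _find_start: first 'S' in row-major order
def pvFindS : List String → Int → Option (Int × Int)
  | [], _ => none
  | l :: rest, y =>
    match (PySem.List.enumerate l.toList 0).find? (fun q => q.2 == 'S') with
    | some q => some (q.1, y)
    | none => pvFindS rest (y + 1)

-- get(row, x) = row[x] if 0 <= x < width else 1 (row always has length width, so row[x] is exact)
def pvBGet (below : List Int) (width : Int) (x : Int) : Int :=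
  if 0 ≤ x ∧ x < width then below.getD x.toNat 1 else 1

-- one row of the list comprehension
def pvDpRow (line : List Char) (width : Int) (below : List Int) : List Int :=
  (List.range width.toNat).map (fun (xn : Nat) =>
    if (xn : Int) < (line.length : Int) ∧ line.getD xn '.' = '^' then
      pvBGet below width ((xn : Int) - 1) + pvBGet below width ((xn : Int) + 1)
    else below.getD xn 1)

-- the while-loop: y from height-1 down to sy
def pvDpLoop (lines : List String) (width sy y : Int) (below : List Int) : List Int :=
  if _h : sy ≤ y then
    pvDpLoop lines width sy (y - 1) (pvDpRow (lines.getD y.toNat "").toList width below)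
  else below
termination_by (y - sy + 1).toNat
decreasing_by omega

def part2_alt (lines : List String) : Int :=
  let height : Int := lines.length
  let width : Int := (lines.map PySem.Str.len).foldl max 0
  match pvFindS lines 0 with
  | some s =>
      pvBGet (pvDpLoop lines width s.2 (height - 1) (List.replicate width.toNat 1)) width s.1
  | none => 0   -- Python B raises ValueError here; excluded by Pre_part2

-- ===== PRECONDITION & SPEC =====
-- the character A's defaultdict yields at (x, y)
def pvCell (lines : List String) (x y : Int) : Char :=
  if 0 ≤ x ∧ 0 ≤ y then ((lines.getD y.toNat "").toList).getD x.toNat '.' else '.'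

-- the cells A's routes() recursion steps to from p (one step of A's call graph)
def pvSuccs (lines : List String) (p : Int × Int) : List (Int × Int) :=
  if p.2 < (lines.length : Int) then
    if pvCell lines p.1 p.2 = '^' then [(p.1 - 1, p.2), (p.1 + 1, p.2)]
    else [(p.1, p.2 + 1)]
  else []

def pvStep (lines : List String) (s : PySem.Set (Int × Int)) : PySem.Set (Int × Int) :=
  PySem.Set.update s (s.flatMap (pvSuccs lines))

-- the cells reachable from p0 in at most n steps of A's call graph
def pvReach (lines : List String) (p0 : Int × Int) : Nat → PySem.Set (Int × Int)
  | 0 => PySem.Set.ofList [p0]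
  | n + 1 => pvStep lines (pvReach lines p0 n)

-- the row-major-first 'S' cell, stated with library findIdx (not by running either port's search)
def pvStart (lines : List String) : Int × Int :=
  (((lines.getD (lines.findIdx (fun l => l.toList.contains 'S')) "").toList.findIdx
      (fun c => c = 'S') : Int),
   ((lines.findIdx (fun l => l.toList.contains 'S')) : Int))

-- Pre_part2 excludes exactly the inputs on which the Python A raises: grids with no 'S'
-- (next() raises StopIteration) and grids where a '^' with a horizontally adjacent '^' is
-- REACHABLE from the start (A's routes recurses on itself: RecursionError); 2*height+2 steps
-- bound every path A's recursion can take before first hitting such a cell, so the bound loses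
-- nothing.  Unreachable adjacent '^' stay inside Pre_ and B matches A on them.
def Pre_part2 (lines : List String) : Prop :=
  lines.any (fun l => l.toList.contains 'S') = true ∧
  ∀ p ∈ pvReach lines (pvStart lines) (2 * lines.length + 2),
    pvCell lines p.1 p.2 = '^' →
    pvCell lines (p.1 - 1) p.2 ≠ '^' ∧ pvCell lines (p.1 + 1) p.2 ≠ '^'
instance (lines : List String) : Decidable (Pre_part2 lines) := by unfold Pre_part2; infer_instance

def pvWitness_part2 : List String := ["S"]

def Spec_part2 (lines : List String) (out : Int) : Prop := out = part2_alt lines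
instance (lines : List String) (out : Int) : Decidable (Spec_part2 lines out) := by unfold Spec_part2; infer_instance

-- ===== CLAIM (what is proved, stated in full; the proofs are below) =====
def Claim_equal_part2 : Prop := ∀ (lines : List String), Dom_part2 lines → Pre_part2 lines → Spec_part2 lines (part2 lines)

-- ===== LEMMAS AND PROOFS =====

-- route count from cell (x, y): the common mathematical description of both programs
def pvN (lines : List String) (x y : Int) : Int :=
  if _h : (lines.length : Int) ≤ y then 1
  else if pvCell lines x y = '^' then pvN lines (x - 1) (y + 1) + pvN lines (x + 1) (y + 1)
  else pvN lines x (y + 1)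
termination_by ((lines.length : Int) - y).toNat
decreasing_by all_goals omega

def pvGridItems (lines : List String) (s : Int) : List ((Int × Int) × Char) :=
  match lines with
  | [] => []
  | l :: rest =>
    (PySem.List.enumerate l.toList 0).map (fun q => ((q.1, s), q.2)) ++ pvGridItems rest (s + 1)

def pvWidth (lines : List String) : Int := (lines.map PySem.Str.len).foldl max 0

theorem pvRowKeys_nodup (cs : List Char) (s : Int) :
    ((PySem.List.enumerate cs 0).map (fun q => ((q.1, s) : Int × Int))).Nodup := by
  have hp := PySem.List.pairwise_lt_enumerate cs (0 : Int)
  exact List.Pairwise.map _ (fun a b hab => by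
    intro heq
    have : a.1 = b.1 := by
      have := congrArg Prod.fst heq
      simpa using this
    omega) hp

theorem pvGridFold (lines : List String) : ∀ (s : Int) (d : PySem.Dict (Int × Int) Char),
    (∀ k ∈ d.keys, k.2 < s) →
    ((PySem.List.enumerate lines s).foldl
      (fun d p => (PySem.List.enumerate p.2.toList 0).foldl (fun d q => d.insert (q.1, p.1) q.2) d)
      d).items = d.items ++ pvGridItems lines s := by
  induction lines with
  | nil => intro s d _; simp [PySem.List.enumerate_nil, pvGridItems]
  | cons l rest ih =>
    intro s d hd
    rw [PySem.List.enumerate_cons, List.foldl_cons]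
    have hfresh : ∀ a ∈ PySem.List.enumerate l.toList 0,
        d.contains ((a.1, s) : Int × Int) = false := by
      intro a _
      by_contra hc
      have : d.contains ((a.1, s) : Int × Int) = true := by
        cases h : d.contains ((a.1, s) : Int × Int) <;> simp_all
      have hmem := (PySem.Dict.contains_iff_mem_keys (d := d) _).mp this
      have := hd _ hmem
      omega
    have hinner := PySem.Dict.items_foldl_insert_fresh (l := PySem.List.enumerate l.toList 0)
      (k := fun q => ((q.1, s) : Int × Int)) (v := fun q => q.2) (d := d)
      hfresh (pvRowKeys_nodup l.toList s)
    have hkeys : ∀ k ∈ ((PySem.List.enumerate l.toList 0).foldl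
        (fun d q => d.insert (q.1, s) q.2) d).keys, (k : Int × Int).2 < s + 1 := by
      intro k hk
      have : k ∈ (d.items ++ (PySem.List.enumerate l.toList 0).map
          (fun a => (((a.1, s) : Int × Int), a.2))).map (·.1) := by
        rw [← hinner]; exact hk
      simp only [List.map_append, List.mem_append, List.map_map] at this
      rcases this with h | h
      · have := hd _ h; omega
      · simp only [List.mem_map] at h
        obtain ⟨a, _, ha⟩ := h
        subst ha; simp
    rw [ih (s + 1) _ hkeys, hinner, pvGridItems]
    simp [List.append_assoc]

theorem pvGrid_items (lines : List String) :
    (pvBuildGrid lines).items = pvGridItems lines 0 := by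
  have := pvGridFold lines 0 PySem.Dict.empty (by simp [PySem.Dict.keys_empty])
  simpa [pvBuildGrid, PySem.Dict.empty] using this

theorem pvRow_get? (y x y' : Int) : ∀ (cs : List Char) (x0 : Int)
    (rest : List ((Int × Int) × Char)),
    (PySem.Dict.mk ((PySem.List.enumerate cs x0).map (fun q => ((q.1, y), q.2)) ++ rest)).get?
        (x, y')
      = if y' = y ∧ x0 ≤ x ∧ x < x0 + cs.length then some (cs.getD (x - x0).toNat '.')
        else (PySem.Dict.mk rest).get? (x, y') := by
  intro cs
  induction cs with
  | nil =>
    intro x0 rest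
    rw [if_neg (by simp only [List.length_nil]; push_cast; omega)]
    simp [PySem.List.enumerate_nil]
  | cons c cs ih =>
    intro x0 rest
    rw [PySem.List.enumerate_cons]
    simp only [List.map_cons, List.cons_append]
    rw [PySem.Dict.get?_mk_cons]
    by_cases hxy : x = x0 ∧ y' = y
    · obtain ⟨hx, hy⟩ := hxy
      subst hx; subst hy
      rw [if_pos (by simp), if_pos ⟨rfl, by omega,
        by simp only [List.length_cons]; push_cast; omega⟩]
      simp
    · rw [if_neg (by simp only [beq_iff_eq, Prod.mk.injEq]; tauto)]
      rw [ih (x0 + 1) rest]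
      by_cases hc : y' = y ∧ x0 + 1 ≤ x ∧ x < x0 + 1 + cs.length
      · rw [if_pos hc, if_pos (by
          simp only [List.length_cons] at hc ⊢; push_cast at hc ⊢; omega)]
        have hn : (x - x0).toNat = (x - (x0 + 1)).toNat + 1 := by omega
        rw [hn, List.getD_cons_succ]
      · rw [if_neg hc, if_neg (by
          intro h
          obtain ⟨h1, h2, h3⟩ := h
          simp only [List.length_cons] at h3
          push_cast at h3
          exact hc ⟨h1, by omega, by omega⟩)]

theorem pvGrid_get? (lines : List String) : ∀ (s x y : Int),
    (PySem.Dict.mk (pvGridItems lines s)).get? (x, y) =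
      if s ≤ y ∧ y < s + lines.length ∧ 0 ≤ x ∧
          x < ((lines.getD (y - s).toNat "").toList.length : Int)
      then some (((lines.getD (y - s).toNat "").toList).getD x.toNat '.') else none := by
  induction lines with
  | nil =>
    intro s x y
    rw [if_neg (by intro h; simp at h; omega)]
    simp [pvGridItems, show (PySem.Dict.mk ([] : List ((Int × Int) × Char))) = PySem.Dict.empty
      from rfl]
  | cons l rest ih =>
    intro s x y
    rw [pvGridItems, pvRow_get? s x y l.toList 0 (pvGridItems rest (s + 1))]
    have h0 : (s - s).toNat = 0 := by omega
    by_cases hy : y = s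
    · subst hy
      by_cases hx : 0 ≤ x ∧ x < (l.toList.length : Int)
      · rw [if_pos ⟨rfl, by omega, by omega⟩, if_pos (by
          refine ⟨by omega, by simp only [List.length_cons]; push_cast; omega, hx.1, ?_⟩
          rw [h0, List.getD_cons_zero]; exact hx.2)]
        rw [h0, List.getD_cons_zero, show x - 0 = x from by omega]
      · rw [if_neg (by intro h; exact hx ⟨h.2.1, by omega⟩), ih (y + 1) x y,
          if_neg (by omega), if_neg (by
            intro h
            rw [h0, List.getD_cons_zero] at h
            exact hx ⟨h.2.2.1, h.2.2.2⟩)]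
    · rw [if_neg (by tauto), ih (s + 1) x y]
      by_cases hc : s + 1 ≤ y ∧ y < s + 1 + rest.length ∧ 0 ≤ x ∧
          x < ((rest.getD (y - (s + 1)).toNat "").toList.length : Int)
      · have hn : (y - s).toNat = (y - (s + 1)).toNat + 1 := by omega
        rw [if_pos hc, if_pos (by
          rw [hn, List.getD_cons_succ]
          exact ⟨by omega, by simp only [List.length_cons]; push_cast; omega,
            hc.2.2.1, hc.2.2.2⟩)]
        rw [hn, List.getD_cons_succ]
      · rw [if_neg hc, if_neg (by
          intro h
          have hn : (y - s).toNat = (y - (s + 1)).toNat + 1 := by omega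
          rw [hn, List.getD_cons_succ] at h
          simp only [List.length_cons] at h
          push_cast at h
          exact hc ⟨by omega, by omega, h.2.2.1, h.2.2.2⟩)]

theorem pvGrid_getD (lines : List String) (x y : Int) :
    (pvBuildGrid lines).getD (x, y) '.' = pvCell lines x y := by
  have hmk : pvBuildGrid lines = PySem.Dict.mk (pvGridItems lines 0) := by
    apply PySem.Dict.ext
    rw [pvGrid_items]
  rw [hmk, PySem.Dict.getD_eq_get?_getD, pvGrid_get? lines 0 x y]
  unfold pvCell
  by_cases hc : 0 ≤ y ∧ y < (0 : Int) + lines.length ∧ 0 ≤ x ∧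
      x < ((lines.getD (y - 0).toNat "").toList.length : Int)
  · rw [if_pos hc, if_pos ⟨hc.2.2.1, hc.1⟩]
    rw [show y - 0 = y from by omega]
    simp
  · rw [if_neg hc]
    simp only [Option.getD_none]
    by_cases hxy : 0 ≤ x ∧ 0 ≤ y
    · rw [if_pos hxy]
      rw [show y - 0 = y from by omega] at hc
      by_cases hyl : y < (lines.length : Int)
      · have hxl : (lines.getD y.toNat "").toList.length ≤ x.toNat := by omega
        rw [List.getD_eq_default _ _ hxl]
      · have hyl' : lines.length ≤ y.toNat := by omega
        rw [List.getD_eq_default _ _ hyl']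
        simp
    · rw [if_neg hxy]

theorem pvFind_bridge (lines : List String) : ∀ (s : Int),
    (pvGridItems lines s).find? (fun pv => pv.2 == 'S')
      = (pvFindS lines s).map (fun q => ((q.1, q.2), 'S')) := by
  induction lines with
  | nil => intro s; simp [pvGridItems, pvFindS]
  | cons l rest ih =>
    intro s
    rw [pvGridItems, pvFindS, List.find?_append, List.find?_map]
    cases hf : (PySem.List.enumerate l.toList 0).find? (fun q => q.2 == 'S') with
    | none =>
      have : (PySem.List.enumerate l.toList 0).find?
          ((fun pv => pv.2 == 'S') ∘ fun q => ((q.1, s), q.2)) = none := by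
        rw [show ((fun (pv : (Int × Int) × Char) => pv.2 == 'S') ∘
          fun (q : Int × Char) => ((q.1, s), q.2)) = (fun q => q.2 == 'S') from rfl, hf]
      rw [this]
      simpa using ih (s + 1)
    | some q =>
      have hS : q.2 = 'S' := by
        have := List.find?_some hf
        simpa using this
      have : (PySem.List.enumerate l.toList 0).find?
          ((fun pv => pv.2 == 'S') ∘ fun q => ((q.1, s), q.2)) = some q := by
        rw [show ((fun (pv : (Int × Int) × Char) => pv.2 == 'S') ∘
          fun (q : Int × Char) => ((q.1, s), q.2)) = (fun q => q.2 == 'S') from rfl, hf]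
      rw [this]
      simp [hS]

theorem pvFindS_bounds (lines : List String) : ∀ (y0 sx sy : Int),
    pvFindS lines y0 = some (sx, sy) →
    y0 ≤ sy ∧ sy < y0 + lines.length ∧ 0 ≤ sx ∧
      sx < ((lines.getD (sy - y0).toNat "").toList.length : Int) := by
  induction lines with
  | nil => intro y0 sx sy h; simp [pvFindS] at h
  | cons l rest ih =>
    intro y0 sx sy h
    rw [pvFindS] at h
    cases hf : (PySem.List.enumerate l.toList 0).find? (fun q => q.2 == 'S') with
    | some q =>
      rw [hf] at h
      have hq : sx = q.1 ∧ sy = y0 := by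
        simp at h
        exact ⟨h.1.symm, h.2.symm⟩
      obtain ⟨hsx, hsy⟩ := hq
      have hmem := List.mem_of_find?_eq_some hf
      rw [PySem.List.mem_enumerate_iff] at hmem
      obtain ⟨k, hk, hqe⟩ := hmem
      have h0 : (sy - y0).toNat = 0 := by omega
      refine ⟨by omega, by simp only [List.length_cons]; push_cast; omega, ?_, ?_⟩
      · rw [hsx, hqe]; simp
      · rw [h0, List.getD_cons_zero, hsx, hqe]
        show ((0 : Int) + (k : Int)) < (l.toList.length : Int)
        omega
    | none =>
      rw [hf] at h
      have := ih (y0 + 1) sx sy h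
      have hn : (sy - y0).toNat = (sy - (y0 + 1)).toNat + 1 := by omega
      rw [hn, List.getD_cons_succ]
      refine ⟨by omega, by simp only [List.length_cons]; push_cast; omega, this.2.2.1,
        this.2.2.2⟩

theorem pvWidth_le (lines : List String) (l : String) (hl : l ∈ lines) :
    (l.toList.length : Int) ≤ pvWidth lines := by
  have h := (PySem.List.le_foldl_max (lines.map PySem.Str.len) 0).2 (PySem.Str.len l)
    (List.mem_map_of_mem hl)
  have hlen : PySem.Str.len l = (l.toList.length : Int) := by
    simp [PySem.Str.len]
  rw [hlen] at h
  exact h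

theorem pvLine_mem (lines : List String) (n : Nat) :
    lines.getD n "" = "" ∨ lines.getD n "" ∈ lines := by
  by_cases h : n < lines.length
  · right
    rw [List.getD_eq_getElem _ _ h]
    exact List.getElem_mem h
  · left
    exact List.getD_eq_default _ _ (by omega)

theorem pvCell_out (lines : List String) (x y : Int)
    (hx : x < 0 ∨ pvWidth lines ≤ x) : pvCell lines x y = '.' := by
  unfold pvCell
  by_cases hxy : 0 ≤ x ∧ 0 ≤ y
  · rw [if_pos hxy]
    have hw : pvWidth lines ≤ x := by omega
    rcases pvLine_mem lines y.toNat with h | h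
    · rw [h]; simp
    · have := pvWidth_le lines _ h
      exact List.getD_eq_default _ _ (by omega)
  · rw [if_neg hxy]

theorem pvN_out_aux (lines : List String) : ∀ (k : Nat) (y x : Int),
    ((lines.length : Int) - y).toNat ≤ k → (x < 0 ∨ pvWidth lines ≤ x) →
    pvN lines x y = 1 := by
  intro k
  induction k with
  | zero =>
    intro y x hk hx
    rw [pvN, dif_pos (by omega)]
  | succ k ih =>
    intro y x hk hx
    by_cases hy : (lines.length : Int) ≤ y
    · rw [pvN, dif_pos hy]
    · rw [pvN, dif_neg hy, if_neg (by rw [pvCell_out lines x y hx]; decide)]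
      exact ih (y + 1) x (by omega) hx

theorem pvN_out (lines : List String) (x y : Int)
    (hx : x < 0 ∨ pvWidth lines ≤ x) : pvN lines x y = 1 :=
  pvN_out_aux lines ((lines.length : Int) - y).toNat y x le_rfl hx

-- reachability closure: one step of monotonicity
theorem pvReach_le_succ (lines : List String) (p0 : Int × Int) (n : Nat)
    (p : Int × Int) (hp : p ∈ pvReach lines p0 n) : p ∈ pvReach lines p0 (n + 1) := by
  rw [pvReach, pvStep]
  exact (PySem.Set.mem_update _ _ _).mpr (Or.inl hp)

theorem pvReach_mono (lines : List String) (p0 : Int × Int) (k N : Nat) (hk : k ≤ N)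
    (p : Int × Int) (hp : p ∈ pvReach lines p0 k) : p ∈ pvReach lines p0 N := by
  induction N with
  | zero => rwa [Nat.le_zero.mp hk] at hp
  | succ N ih =>
    by_cases h : k = N + 1
    · rwa [h] at hp
    · exact pvReach_le_succ lines p0 N p (ih (by omega))

theorem pvReach_step (lines : List String) (p0 : Int × Int) (n : Nat)
    (p q : Int × Int) (hp : p ∈ pvReach lines p0 n) (hq : q ∈ pvSuccs lines p) :
    q ∈ pvReach lines p0 (n + 1) := by
  rw [pvReach, pvStep]
  exact (PySem.Set.mem_update _ _ _).mpr (Or.inr (List.mem_flatMap.mpr ⟨p, hp, hq⟩))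

theorem pvEnumFind (cs : List Char) : ∀ (s : Int), cs.contains 'S' = true →
    (PySem.List.enumerate cs s).find? (fun q => q.2 == 'S')
      = some (s + (cs.findIdx (fun c => c = 'S') : Int), 'S') := by
  induction cs with
  | nil => intro s h; simp at h
  | cons c cs ih =>
    intro s h
    rw [PySem.List.enumerate_cons]
    by_cases hc : c = 'S'
    · subst hc
      rw [List.find?_cons_of_pos (by simp)]
      simp [List.findIdx_cons]
    · have h' : cs.contains 'S' = true := by
        rcases (by simpa using h : 'S' = c ∨ 'S' ∈ cs) with h1 | h1
        · exact absurd h1.symm hc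
        · simpa using h1
      rw [List.find?_cons_of_neg (by simp [hc]), ih (s + 1) h']
      simp only [List.findIdx_cons, hc, decide_false, cond_false, Option.some.injEq,
        Prod.mk.injEq]
      refine ⟨?_, trivial⟩
      push_cast
      omega

theorem pvFindS_eq_start (lines : List String) : ∀ (y0 : Int),
    lines.any (fun l => l.toList.contains 'S') = true →
    pvFindS lines y0
      = some (((lines.getD (lines.findIdx (fun l => l.toList.contains 'S')) "").toList.findIdx
                 (fun c => c = 'S') : Int),
              y0 + ((lines.findIdx (fun l => l.toList.contains 'S')) : Int)) := by
  induction lines with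
  | nil => intro y0 h; simp at h
  | cons l rest ih =>
    intro y0 h
    rw [pvFindS]
    by_cases hl : l.toList.contains 'S' = true
    · rw [pvEnumFind l.toList 0 hl]
      have hm : 'S' ∈ l.toList := by simpa using hl
      simp [List.findIdx_cons, hm]
    · have hnone : (PySem.List.enumerate l.toList 0).find? (fun q => q.2 == 'S') = none := by
        rw [List.find?_eq_none]
        intro q hq
        rw [PySem.List.mem_enumerate_iff] at hq
        obtain ⟨k, hk, hqe⟩ := hq
        subst hqe
        simp only [beq_iff_eq]
        intro hS
        exact hl (by rw [List.contains_iff_mem]; rw [← hS]; exact List.getElem_mem hk)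
      rw [hnone]
      have hrest : rest.any (fun l => l.toList.contains 'S') = true := by
        simp only [List.any_cons, hl, Bool.false_or] at h
        exact h
      rw [ih (y0 + 1) hrest]
      have hlf : l.toList.contains 'S' = false := by
        simpa using hl
      simp only [List.findIdx_cons, hlf, cond_false, List.getD_cons_succ, Option.some.injEq,
        Prod.mk.injEq]
      refine ⟨trivial, ?_⟩
      push_cast
      omega

theorem pvWalkA_eq_N (lines : List String) (p0 : Int × Int) (N : Nat)
    (hgood : ∀ p ∈ pvReach lines p0 N,
      pvCell lines p.1 p.2 = '^' →
      pvCell lines (p.1 - 1) p.2 ≠ '^' ∧ pvCell lines (p.1 + 1) p.2 ≠ '^') :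
    ∀ (n fuel k : Nat) (x y : Int),
      (x, y) ∈ pvReach lines p0 k →
      k + 2 * ((lines.length : Int) - y).toNat + 2 ≤ N →
      fuel + ((lines.length : Int) - y).toNat ≤ n →
      ((lines.length : Int) - y).toNat < fuel →
      pvWalkA (pvBuildGrid lines) (lines.length : Int) fuel x y = pvN lines x y := by
  intro n
  induction n with
  | zero => intro fuel k x y _ _ h1 h2; omega
  | succ n ih =>
    intro fuel k x y hmem hkN h1 h2
    by_cases hy : y < (lines.length : Int)
    · by_cases hc : pvCell lines x y = '^'
      · cases fuel with
        | zero => omega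
        | succ f =>
          obtain ⟨hnl, hnr⟩ :=
            hgood (x, y) (pvReach_mono lines p0 k N (by omega) _ hmem) hc
          have hmemL : (x - 1, y) ∈ pvReach lines p0 (k + 1) :=
            pvReach_step lines p0 k _ _ hmem (by simp [pvSuccs, hy, hc])
          have hmemR : (x + 1, y) ∈ pvReach lines p0 (k + 1) :=
            pvReach_step lines p0 k _ _ hmem (by simp [pvSuccs, hy, hc])
          have hmemL' : (x - 1, y + 1) ∈ pvReach lines p0 (k + 2) :=
            pvReach_step lines p0 (k + 1) _ _ hmemL (by simp [pvSuccs, hy, hnl])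
          have hmemR' : (x + 1, y + 1) ∈ pvReach lines p0 (k + 2) :=
            pvReach_step lines p0 (k + 1) _ _ hmemR (by simp [pvSuccs, hy, hnr])
          have e1 : pvWalkA (pvBuildGrid lines) (lines.length : Int) f (x - 1) y
              = pvWalkA (pvBuildGrid lines) (lines.length : Int) f (x - 1) (y + 1) := by
            rw [pvWalkA.eq_def, dif_pos hy, pvGrid_getD, if_neg hnl]
          have e2 : pvWalkA (pvBuildGrid lines) (lines.length : Int) f (x + 1) y
              = pvWalkA (pvBuildGrid lines) (lines.length : Int) f (x + 1) (y + 1) := by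
            rw [pvWalkA.eq_def, dif_pos hy, pvGrid_getD, if_neg hnr]
          rw [pvWalkA.eq_def, dif_pos hy, pvGrid_getD, if_pos hc]
          show pvWalkA (pvBuildGrid lines) (lines.length : Int) f (x - 1) y
              + pvWalkA (pvBuildGrid lines) (lines.length : Int) f (x + 1) y = _
          rw [e1, e2,
            ih f (k + 2) (x - 1) (y + 1) hmemL' (by omega) (by omega) (by omega),
            ih f (k + 2) (x + 1) (y + 1) hmemR' (by omega) (by omega) (by omega)]
          conv_rhs => rw [pvN]
          rw [dif_neg (by omega), if_pos hc]
      · have hmem' : (x, y + 1) ∈ pvReach lines p0 (k + 1) :=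
          pvReach_step lines p0 k _ _ hmem (by simp [pvSuccs, hy, hc])
        rw [pvWalkA.eq_def, dif_pos hy, pvGrid_getD, if_neg hc,
          ih fuel (k + 1) x (y + 1) hmem' (by omega) (by omega) (by omega)]
        conv_rhs => rw [pvN]
        rw [dif_neg (by omega), if_neg hc]
    · rw [pvWalkA.eq_def, dif_neg hy, pvN, dif_pos (by omega)]

theorem pvGetD_map_range (n : Nat) (f : Nat → Int) (i : Nat) (d : Int) :
    ((List.range n).map f).getD i d = if i < n then f i else d := by
  by_cases h : i < n
  · rw [if_pos h, List.getD_eq_getElem _ _ (by simpa using h)]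
    simp
  · rw [if_neg h, List.getD_eq_default _ _ (by simpa using h)]

theorem pvWidth_nonneg (lines : List String) : 0 ≤ pvWidth lines :=
  (PySem.List.le_foldl_max (lines.map PySem.Str.len) 0).1

theorem pvBGet_N (lines : List String) (t z : Int) :
    pvBGet ((List.range (pvWidth lines).toNat).map (fun (xn : Nat) => pvN lines (xn : Int) t))
        (pvWidth lines) z = pvN lines z t := by
  have hw0 := pvWidth_nonneg lines
  unfold pvBGet
  split_ifs with h
  · rw [pvGetD_map_range _ _ _ _, if_pos (by omega)]
    congr 1
    omega
  · exact (pvN_out lines z t (by omega)).symm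

theorem pvDpRow_step (lines : List String) (y : Int) (hy0 : 0 ≤ y)
    (hyh : y < (lines.length : Int)) :
    pvDpRow (lines.getD y.toNat "").toList (pvWidth lines)
        ((List.range (pvWidth lines).toNat).map (fun (xn : Nat) => pvN lines (xn : Int) (y + 1)))
      = (List.range (pvWidth lines).toNat).map (fun (xn : Nat) => pvN lines (xn : Int) y) := by
  unfold pvDpRow
  apply List.map_congr_left
  intro xn hmem
  rw [List.mem_range] at hmem
  have hcell : pvCell lines (xn : Int) y
      = (lines.getD y.toNat "").toList.getD xn '.' := by
    unfold pvCell
    rw [if_pos ⟨by omega, hy0⟩]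
    simp
  by_cases hc : pvCell lines (xn : Int) y = '^'
  · rw [if_pos ?hcond]
    case hcond =>
      refine ⟨?_, by rw [← hcell]; exact hc⟩
      by_contra hlen
      rw [hcell, List.getD_eq_default _ _ (by omega)] at hc
      exact absurd hc (by decide)
    rw [pvBGet_N lines (y + 1) ((xn : Int) - 1), pvBGet_N lines (y + 1) ((xn : Int) + 1)]
    conv_rhs => rw [pvN]
    rw [dif_neg (by omega), if_pos hc]
  · rw [if_neg (by
      intro hcond
      exact hc (by rw [hcell]; exact hcond.2))]
    rw [pvGetD_map_range _ _ _ _, if_pos hmem]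
    conv_rhs => rw [pvN]
    rw [dif_neg (by omega), if_neg hc]

theorem pvDpLoop_inv (lines : List String) (sy : Int) (hsy : 0 ≤ sy) (k : Nat) :
    ∀ y : Int, y = sy - 1 + k → y ≤ (lines.length : Int) - 1 →
    pvDpLoop lines (pvWidth lines) sy y
        ((List.range (pvWidth lines).toNat).map (fun (xn : Nat) => pvN lines (xn : Int) (y + 1)))
      = (List.range (pvWidth lines).toNat).map (fun (xn : Nat) => pvN lines (xn : Int) sy) := by
  induction k with
  | zero =>
    intro y hk _
    rw [pvDpLoop, dif_neg (by omega), show y + 1 = sy from by omega]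
  | succ k ih =>
    intro y hk hyl
    rw [pvDpLoop, dif_pos (by omega), pvDpRow_step lines y (by omega) (by omega)]
    have h := ih (y - 1) (by omega) (by omega)
    rw [show y - 1 + 1 = y from by omega] at h
    exact h

theorem pvReplicate_one (lines : List String) :
    List.replicate (pvWidth lines).toNat 1
      = (List.range (pvWidth lines).toNat).map
          (fun (xn : Nat) => pvN lines (xn : Int) (((lines.length : Int) - 1) + 1)) := by
  have h : (List.range (pvWidth lines).toNat).map
      (fun (xn : Nat) => pvN lines (xn : Int) (((lines.length : Int) - 1) + 1))
      = (List.range (pvWidth lines).toNat).map (fun (_ : Nat) => (1 : Int)) := by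
    apply List.map_congr_left
    intro xn _
    rw [pvN, dif_pos (by omega)]
  rw [h, List.map_const', List.length_range]

-- ===== VERDICT (by name: the statements are the Claim_ definitions above) =====
theorem part2_spec : Claim_equal_part2 := by
  intro lines _ hpre
  obtain ⟨hsome, hgood⟩ := hpre
  unfold Spec_part2
  have hfind : (pvBuildGrid lines).items.find? (fun pv => pv.2 == 'S')
      = (pvFindS lines 0).map (fun q => ((q.1, q.2), 'S')) := by
    rw [pvGrid_items]
    exact pvFind_bridge lines 0
  have hS : pvFindS lines 0 = some (pvStart lines) := by
    rw [pvFindS_eq_start lines 0 hsome, pvStart]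
    norm_num
  obtain ⟨hsy0, hsyh, hsx0, hsxl⟩ :=
    pvFindS_bounds lines 0 (pvStart lines).1 (pvStart lines).2 (by rw [hS])
  show part2 lines = part2_alt lines
  simp only [part2, part2_alt, hfind, hS, Option.map_some]
  show pvWalkA (pvBuildGrid lines) (lines.length : Int) (lines.length + 1)
        (pvStart lines).1 (pvStart lines).2
    = pvBGet (pvDpLoop lines (pvWidth lines) (pvStart lines).2 ((lines.length : Int) - 1)
        (List.replicate (pvWidth lines).toNat 1)) (pvWidth lines) (pvStart lines).1
  rw [pvWalkA_eq_N lines (pvStart lines) (2 * lines.length + 2) hgood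
    (lines.length + 1 + ((lines.length : Int) - (pvStart lines).2).toNat) (lines.length + 1) 0
    (pvStart lines).1 (pvStart lines).2
    (by rw [pvReach]; exact (PySem.Set.mem_ofList _ _).mpr (List.mem_singleton.mpr rfl))
    (by omega) (by omega) (by omega)]
  rw [pvReplicate_one lines]
  rw [pvDpLoop_inv lines (pvStart lines).2 (by omega) ((lines.length : Int) - (pvStart lines).2).toNat
    ((lines.length : Int) - 1) (by omega) (by omega)]
  rw [pvBGet_N lines (pvStart lines).2 (pvStart lines).1]
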